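-- pv_equiv track=rewrite | github.com/Lyrym/Izanami-RGB-Lights | RGB script/profiles.py | cleanArray
-- ===== SOURCE A (Python) =====
-- def cleanArray(arr):
--     indextopop = None
--     for y in range(len(arr)):
--         if arr[y]>150 or arr[y]<0:
--             indextopop=y
--     if indextopop != None:
--         arr.pop(indextopop)
--     return arr
-- ===== SOURCE B (Python) =====
-- def cleanArray(arr):
--     # Consume from the end: pop values until the first out-of-range one
--     # (which is the last such element of arr), drop it, restore the rest.
--     kept = []
--     while arr:
--         v = arr.pop()
--         if v > 150 or v < 0:
--             break
--         kept.append(v)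
--     arr.extend(reversed(kept))
--     return arr
-- ===== Notes on version B (the rewrite author's own statement) =====
-- stated objective: alternative
-- what changed: B consumes the list from the end with pop() into a kept stack and stops at the first out-of-range value (the last one in the original order), dropping it and restoring the kept suffix, instead of A's forward full scan that records the last out-of-range index and pops it afterwards.
import Mathlib
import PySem

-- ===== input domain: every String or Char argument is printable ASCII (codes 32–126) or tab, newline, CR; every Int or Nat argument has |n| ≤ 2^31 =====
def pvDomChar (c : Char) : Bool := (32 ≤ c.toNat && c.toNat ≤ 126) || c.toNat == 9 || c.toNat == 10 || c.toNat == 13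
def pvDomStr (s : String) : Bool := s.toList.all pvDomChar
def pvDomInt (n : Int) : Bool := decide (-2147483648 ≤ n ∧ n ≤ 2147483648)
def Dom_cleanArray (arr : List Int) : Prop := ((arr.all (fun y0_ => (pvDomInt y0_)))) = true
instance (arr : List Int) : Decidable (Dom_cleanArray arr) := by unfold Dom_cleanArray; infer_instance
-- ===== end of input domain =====

-- B consumes arr from the end (pop until the first out-of-range value, drop it,
-- restore the kept suffix) instead of A's forward index scan that records the last
-- bad index; objective: alternative. Both A and B mutate arr in place in Python;
-- the equivalence proved here is about the returned (final) list contents.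

-- ===== PORT A =====
-- the forward scan recording the last out-of-range index
def idxA (arr : List Int) : Option Nat :=
  (List.range arr.length).foldl
    (fun (acc : Option Nat) (y : Nat) =>
      if 150 < PySem.List.pyGetD arr (y : Int) 0 ∨ PySem.List.pyGetD arr (y : Int) 0 < 0
      then some y else acc)
    none

def cleanArray (arr : List Int) : List Int :=
  match idxA arr with
  | some y =>
    match PySem.List.pop? arr (y : Int) with
    | some r => r.2
    | none => arr   -- unreachable: the recorded index is always in range
  | none => arr

-- ===== PORT B =====
-- the while-loop: head of the first list = next arr.pop(); kept is held
-- head-first, i.e. it IS Python's reversed(kept) that the final extend appends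
def popLoop : List Int → List Int → List Int
  | [], kept => kept
  | v :: rest, kept =>
    if 150 < v ∨ v < 0 then rest.reverse ++ kept else popLoop rest (v :: kept)

def cleanArray_alt (arr : List Int) : List Int := popLoop arr.reverse []

-- ===== PRECONDITION & SPEC =====
def Spec_cleanArray (arr : List Int) (out : List Int) : Prop := out = cleanArray_alt arr
instance (arr : List Int) (out : List Int) : Decidable (Spec_cleanArray arr out) := by unfold Spec_cleanArray; infer_instance

-- ===== CLAIM (what is proved, stated in full; the proofs are below) =====
def Claim_equal_cleanArray : Prop := ∀ (arr : List Int), Dom_cleanArray arr → Spec_cleanArray arr (cleanArray arr)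

-- ===== LEMMAS AND PROOFS =====

-- reference: remove the first out-of-range element of a (reversed) list
def efb : List Int → List Int
  | [] => []
  | v :: rest => if 150 < v ∨ v < 0 then rest else v :: efb rest

theorem popLoop_eq (r kept : List Int) :
    popLoop r kept = (efb r).reverse ++ kept := by
  induction r generalizing kept with
  | nil => simp [popLoop, efb]
  | cons v rest ih =>
    by_cases h : 150 < v ∨ v < 0
    · simp [popLoop, efb, h]
    · simp [popLoop, efb, h, ih]

theorem foldl_some_mem (p : Nat → Prop) [DecidablePred p] (l : List Nat)
    (acc : Option Nat) (y : Nat)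
    (h : l.foldl (fun a z => if p z then some z else a) acc = some y) :
    y ∈ l ∨ acc = some y := by
  induction l generalizing acc with
  | nil => simpa using h
  | cons z rest ih =>
    rcases ih _ h with h1 | h1
    · exact Or.inl (List.mem_cons_of_mem _ h1)
    · by_cases hz : p z
      · simp [hz] at h1
        exact Or.inl (h1 ▸ List.mem_cons_self)
      · simp [hz] at h1
        exact Or.inr h1

theorem idxA_lt (arr : List Int) (y : Nat) (h : idxA arr = some y) :
    y < arr.length := by
  rcases foldl_some_mem (fun z => 150 < PySem.List.pyGetD arr (z : Int) 0 ∨ PySem.List.pyGetD arr (z : Int) 0 < 0) _ _ _ h with h1 | h1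
  · simpa using h1
  · simp at h1

theorem idxA_append (xs : List Int) (x : Int) :
    idxA (xs ++ [x]) =
      if 150 < x ∨ x < 0 then some xs.length else idxA xs := by
  have hfold :
      (List.range xs.length).foldl
        (fun (acc : Option Nat) (y : Nat) =>
          if 150 < PySem.List.pyGetD (xs ++ [x]) (y : Int) 0 ∨
              PySem.List.pyGetD (xs ++ [x]) (y : Int) 0 < 0 then some y else acc) none
      = (List.range xs.length).foldl
        (fun (acc : Option Nat) (y : Nat) =>
          if 150 < PySem.List.pyGetD xs (y : Int) 0 ∨
              PySem.List.pyGetD xs (y : Int) 0 < 0 then some y else acc) none := by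
    apply PySem.List.foldl_congr_mem
    intro acc y hy
    have hy' : y < xs.length := List.mem_range.mp hy
    have hg : PySem.List.pyGetD (xs ++ [x]) (y : Int) 0 = PySem.List.pyGetD xs (y : Int) 0 := by
      simp [PySem.List.pyGetD_natCast, List.getElem?_append_left hy']
    rw [hg]
  have hx : PySem.List.pyGetD (xs ++ [x]) (xs.length : Int) 0 = x := by
    simp [PySem.List.pyGetD_natCast]
  unfold idxA
  rw [List.length_append, List.length_singleton, List.range_succ, List.foldl_append,
    List.foldl_cons, List.foldl_nil, hfold, hx]

theorem cleanArray_char (arr : List Int) :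
    cleanArray arr = (efb arr.reverse).reverse := by
  induction arr using List.reverseRecOn with
  | nil => simp [cleanArray, idxA, efb]
  | append_singleton xs x ih =>
    rw [List.reverse_append, List.reverse_singleton, List.singleton_append]
    by_cases hx : 150 < x ∨ x < 0
    · -- last element is out of range: it is popped
      have hidx : idxA (xs ++ [x]) = some xs.length := by rw [idxA_append]; simp [hx]
      have hpop : PySem.List.pop? (xs ++ [x]) (xs.length : Int)
          = some ((xs ++ [x])[xs.length]'(by simp), (xs ++ [x]).eraseIdx xs.length) :=
        PySem.List.pop?_natCast _ _ (by simp)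
      simp [cleanArray, hidx, hpop, efb, hx, List.eraseIdx_append_of_length_le (le_refl _)]
    · -- last element is fine: same index as for xs, erased to the left of x
      have hidx : idxA (xs ++ [x]) = idxA xs := by rw [idxA_append]; simp [hx]
      have hefb : efb (x :: xs.reverse) = x :: efb xs.reverse := by simp [efb, hx]
      rw [hefb, List.reverse_cons, ← ih]
      cases hy : idxA xs with
      | none => simp [cleanArray, hidx, hy]
      | some y =>
        have hylt : y < xs.length := idxA_lt xs y hy
        have hpop1 : PySem.List.pop? (xs ++ [x]) (y : Int)
            = some ((xs ++ [x])[y]'(by simp; omega), (xs ++ [x]).eraseIdx y) :=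
          PySem.List.pop?_natCast _ _ (by simp; omega)
        have hpop2 : PySem.List.pop? xs (y : Int)
            = some (xs[y]'hylt, xs.eraseIdx y) := PySem.List.pop?_natCast _ _ hylt
        simp [cleanArray, hidx, hy, hpop1, hpop2,
          List.eraseIdx_append_of_lt_length hylt]

-- ===== VERDICT (by name: the statement is the Claim_ definition above) =====
theorem cleanArray_spec : Claim_equal_cleanArray := by
  intro arr _
  unfold Spec_cleanArray cleanArray_alt
  rw [popLoop_eq, List.append_nil, cleanArray_char]
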